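-- pv_equiv track=rewrite | github.com/Mikiyas6/Competitive-Prograrmming | valid-triangle-number.py | triangleNumber
-- ===== SOURCE A (Python) =====
-- from typing import List
--
-- def triangleNumber(nums: List[int]) -> int:
--
--     nums.sort()
--     count = 0
--     n = len(nums)
--
--     for i in range(n - 1, 1, -1):
--         left, right = 0, i - 1
--
--         while left < right:
--             if nums[left] + nums[right] > nums[i]:
--                 # If nums[left] + nums[right] > nums[i], then all pairs in the range (left, right] will satisfy the condition
--                 count += right - left
--                 right -= 1
--             else:
--                 # If nums[left] + nums[right] <= nums[i], then we need to increase the left pointer to increase the sum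
--                 left += 1
--
--     return count
-- ===== SOURCE B (Python) =====
-- from typing import List
--
-- def triangleNumber(nums: List[int]) -> int:
--     # Sort in place (same side effect as the original), then for every pair of
--     # smaller sides binary-search the sorted tail for the first index whose
--     # value is >= their sum; everything before it (past j) is a valid third side.
--     nums.sort()
--     n = len(nums)
--     count = 0
--     for i in range(n - 2):
--         for j in range(i + 1, n - 1):
--             s = nums[i] + nums[j]
--             lo, hi = j + 1, n
--             while lo < hi:
--                 mid = (lo + hi) // 2
--                 if nums[mid] < s:
--                     lo = mid + 1
--                 else:
--                     hi = mid
--             count += lo - (j + 1)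
--     return count
-- ===== Notes on version B (the rewrite author's own statement) =====
-- stated objective: alternative
-- what changed: A's moving two-pointer scan (for each largest side, a shrinking left/right window over the smaller sides) is replaced by a double loop over the two smaller sides with a hand-written binary search into the sorted array for the first index whose value reaches their sum.
import Mathlib
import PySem

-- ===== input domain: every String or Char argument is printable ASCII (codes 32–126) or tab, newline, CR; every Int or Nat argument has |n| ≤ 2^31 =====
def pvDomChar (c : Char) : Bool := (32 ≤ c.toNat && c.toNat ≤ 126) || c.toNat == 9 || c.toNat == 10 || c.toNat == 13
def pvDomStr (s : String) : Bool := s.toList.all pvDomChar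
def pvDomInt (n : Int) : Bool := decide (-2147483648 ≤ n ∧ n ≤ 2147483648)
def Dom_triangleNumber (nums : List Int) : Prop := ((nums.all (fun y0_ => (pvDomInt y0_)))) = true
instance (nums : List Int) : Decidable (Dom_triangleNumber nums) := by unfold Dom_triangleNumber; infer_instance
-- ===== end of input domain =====

-- B replaces A's moving two-pointer scan (largest side outer, shrinking window) by a double loop
-- over the two smaller sides plus a hand-written binary search for the first too-large third side
-- ("alternative" objective). Python A mutates `nums` in place (nums.sort()); B performs the same
-- in-place sort, and the equivalence proved here is about the return value.

-- ===== PORT A =====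
-- inner `while left < right` loop of A; `i` is the index of the candidate largest side
def pvLoopA (s : List Int) (i left right count : Int) : Int :=
  if h : left < right then
    if PySem.List.pyGetD s left 0 + PySem.List.pyGetD s right 0 > PySem.List.pyGetD s i 0 then
      pvLoopA s i left (right - 1) (count + (right - left))
    else
      pvLoopA s i (left + 1) right count
  else count
termination_by (right - left).toNat
decreasing_by all_goals omega

def triangleNumber (nums : List Int) : Int :=
  let s := PySem.List.sorted nums (fun x => x) false
  let n : Int := PySem.List.len s
  (PySem.List.pyRange (n - 1) 1 (-1)).foldl (fun count i => pvLoopA s i 0 (i - 1) count) 0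

-- ===== PORT B =====
-- hand-written `while lo < hi` binary search of Source B (first index in [lo,hi) with value ≥ x)
def pvBisectB (s : List Int) (x lo hi : Int) : Int :=
  if h : lo < hi then
    let mid := PySem.Int.floordiv (lo + hi) 2
    if PySem.List.pyGetD s mid 0 < x then pvBisectB s x (mid + 1) hi
    else pvBisectB s x lo mid
  else lo
termination_by (hi - lo).toNat
decreasing_by
  all_goals
    have h1 := PySem.Int.floordiv_two_mid_bounds (lo := lo) (hi := hi) (le_of_lt h)
    have h2 : PySem.Int.floordiv (lo + hi) 2 < hi :=
      (PySem.Int.floordiv_lt_iff_lt_mul (by omega)).mpr (by omega)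
    omega

def triangleNumber_alt (nums : List Int) : Int :=
  let s := PySem.List.sorted nums (fun x => x) false
  let n : Int := PySem.List.len s
  (PySem.List.pyRange 0 (n - 2) 1).foldl (fun count i =>
    (PySem.List.pyRange (i + 1) (n - 1) 1).foldl (fun count j =>
      count + (pvBisectB s (PySem.List.pyGetD s i 0 + PySem.List.pyGetD s j 0) (j + 1) n - (j + 1)))
      count) 0

-- ===== PRECONDITION & SPEC =====
def Spec_triangleNumber (nums : List Int) (out : Int) : Prop := out = triangleNumber_alt nums
instance (nums : List Int) (out : Int) : Decidable (Spec_triangleNumber nums out) := by unfold Spec_triangleNumber; infer_instance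

-- ===== CLAIM (what is proved, stated in full; the proofs are below) =====
def Claim_equal_triangleNumber : Prop := ∀ (nums : List Int), Dom_triangleNumber nums → Spec_triangleNumber nums (triangleNumber nums)

-- ===== LEMMAS AND PROOFS =====

-- the number of index triples a < b < c into s forming a valid triangle (both ports compute this)
def pvCnt3 (s : List Int) : Int :=
  ∑ c ∈ Finset.range s.length, ∑ b ∈ Finset.range s.length, ∑ a ∈ Finset.range s.length,
    if a < b ∧ s.getD a 0 + s.getD b 0 > s.getD c 0 ∧ b < c then (1 : Int) else 0

-- the c-th slice of pvCnt3
def pvT (s : List Int) (c : Nat) : Int :=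
  ∑ b ∈ Finset.range s.length, ∑ a ∈ Finset.range s.length,
    if a < b ∧ s.getD a 0 + s.getD b 0 > s.getD c 0 ∧ b < c then (1 : Int) else 0

-- what A's inner two-pointer loop counts for largest side c
def pvSN (s : List Int) (c : Nat) : Int :=
  ∑ b ∈ Finset.range c, ∑ a ∈ Finset.range c,
    if a < b ∧ s.getD a 0 + s.getD b 0 > s.getD c 0 then (1 : Int) else 0

-- what B's binary search counts for the pair (a, b) of smaller sides
def pvK (s : List Int) (a b : Nat) : Int :=
  ∑ c ∈ Finset.Ico (b + 1) s.length,
    if s.getD a 0 + s.getD b 0 > s.getD c 0 then (1 : Int) else 0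

-- monotone access into a sorted list, phrased with getD
lemma pv_getD_mono (xs : List Int) {p q : Nat} (hpq : p ≤ q)
    (hq : q < (PySem.List.sorted xs (fun x => x) false).length) :
    (PySem.List.sorted xs (fun x => x) false).getD p 0 ≤
      (PySem.List.sorted xs (fun x => x) false).getD q 0 := by
  rw [List.getD_eq_getElem _ _ (lt_of_le_of_lt hpq hq), List.getD_eq_getElem _ _ hq]
  exact PySem.List.sorted_id_getElem_mono xs hpq hq

-- restrict a sum over range n to range c when the summand vanishes above c
lemma pv_sum_range_restrict (f : Nat → Int) {c n : Nat} (hc : c ≤ n) :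
    (∑ x ∈ Finset.range n, if x < c then f x else 0) = ∑ x ∈ Finset.range c, f x := by
  have hsub : Finset.range c ⊆ Finset.range n := fun x hx =>
    Finset.mem_range.mpr (lt_of_lt_of_le (Finset.mem_range.mp hx) hc)
  calc (∑ x ∈ Finset.range n, if x < c then f x else 0)
      = ∑ x ∈ Finset.range n, if x ∈ Finset.range c then f x else 0 := by
        simp [Finset.mem_range]
    _ = ∑ x ∈ Finset.range n ∩ Finset.range c, f x := Finset.sum_ite_mem _ _ _
    _ = ∑ x ∈ Finset.range c, f x := by rw [Finset.inter_eq_right.mpr hsub]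

-- ===== A side =====

-- value of the two-pointer loop: pairs (a, b), l ≤ a < b ≤ r, with s[a] + s[b] > s[i]
lemma pv_loopA_eq (s : List Int)
    (hmono : ∀ p q : Nat, p ≤ q → q < s.length → s.getD p 0 ≤ s.getD q 0)
    (i : Nat) :
    ∀ (m l r : Nat), r - l ≤ m → r < s.length → ∀ c : Int,
      pvLoopA s (i : Int) (l : Int) (r : Int) c =
        c + ∑ b ∈ Finset.Icc l r, ∑ a ∈ Finset.Icc l r,
          (if a < b ∧ s.getD a 0 + s.getD b 0 > s.getD i 0 then (1 : Int) else 0) := by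
  intro m
  induction m with
  | zero =>
    intro l r hm hr c
    rw [pvLoopA, dif_neg (by omega)]
    have hz : (∑ b ∈ Finset.Icc l r, ∑ a ∈ Finset.Icc l r,
        (if a < b ∧ s.getD a 0 + s.getD b 0 > s.getD i 0 then (1 : Int) else 0)) = 0 := by
      apply Finset.sum_eq_zero; intro b hb
      apply Finset.sum_eq_zero; intro a ha
      simp only [Finset.mem_Icc] at hb ha
      rw [if_neg]; rintro ⟨h1, _⟩; omega
    rw [hz]; ring
  | succ m IH =>
    intro l r hm hr c
    by_cases hlr : l < r
    · rw [pvLoopA, dif_pos (by exact_mod_cast hlr)]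
      simp only [PySem.List.pyGetD_natCast]
      by_cases hgt : s.getD l 0 + s.getD r 0 > s.getD i 0
      · rw [if_pos hgt]
        rw [show ((r : Int) - 1) = ((r - 1 : Nat) : Int) by omega]
        rw [IH l (r - 1) (by omega) (by omega) (c + ((r : Int) - (l : Int)))]
        have hins : Finset.Icc l r = insert r (Finset.Icc l (r - 1)) := by
          ext x; simp only [Finset.mem_Icc, Finset.mem_insert]; omega
        have hnot : r ∉ Finset.Icc l (r - 1) := by simp only [Finset.mem_Icc]; omega
        have h2 : ∀ b ∈ Finset.Icc l (r - 1),
            (∑ a ∈ insert r (Finset.Icc l (r - 1)),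
              (if a < b ∧ s.getD a 0 + s.getD b 0 > s.getD i 0 then (1 : Int) else 0)) =
            ∑ a ∈ Finset.Icc l (r - 1),
              (if a < b ∧ s.getD a 0 + s.getD b 0 > s.getD i 0 then (1 : Int) else 0) := by
          intro b hb; simp only [Finset.mem_Icc] at hb
          rw [Finset.sum_insert hnot, if_neg (by rintro ⟨h1, _⟩; omega), zero_add]
        have h1 : (∑ a ∈ insert r (Finset.Icc l (r - 1)),
            (if a < r ∧ s.getD a 0 + s.getD r 0 > s.getD i 0 then (1 : Int) else 0)) =
            ((r : Int) - (l : Int)) := by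
          rw [Finset.sum_insert hnot, if_neg (by rintro ⟨h1, _⟩; omega), zero_add]
          have hone : ∀ a ∈ Finset.Icc l (r - 1),
              (if a < r ∧ s.getD a 0 + s.getD r 0 > s.getD i 0 then (1 : Int) else 0) = 1 := by
            intro a ha; simp only [Finset.mem_Icc] at ha
            have hla : s.getD l 0 ≤ s.getD a 0 := hmono l a ha.1 (by omega)
            rw [if_pos ⟨by omega, by omega⟩]
          rw [Finset.sum_congr rfl hone, Finset.sum_const, Nat.card_Icc, nsmul_eq_mul, mul_one]
          omega
        rw [hins, Finset.sum_insert hnot, Finset.sum_congr rfl h2, h1]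
        ring
      · rw [if_neg hgt]
        rw [show ((l : Int) + 1) = ((l + 1 : Nat) : Int) by omega]
        rw [IH (l + 1) r (by omega) hr c]
        congr 1
        have hins : Finset.Icc l r = insert l (Finset.Icc (l + 1) r) := by
          ext x; simp only [Finset.mem_Icc, Finset.mem_insert]; omega
        have hnot : l ∉ Finset.Icc (l + 1) r := by simp only [Finset.mem_Icc]; omega
        have h0 : (∑ a ∈ insert l (Finset.Icc (l + 1) r),
            (if a < l ∧ s.getD a 0 + s.getD l 0 > s.getD i 0 then (1 : Int) else 0)) = 0 := by
          apply Finset.sum_eq_zero; intro a ha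
          simp only [Finset.mem_insert, Finset.mem_Icc] at ha
          rw [if_neg]; rintro ⟨h1, _⟩; omega
        have h2 : ∀ b ∈ Finset.Icc (l + 1) r,
            (∑ a ∈ insert l (Finset.Icc (l + 1) r),
              (if a < b ∧ s.getD a 0 + s.getD b 0 > s.getD i 0 then (1 : Int) else 0)) =
            ∑ a ∈ Finset.Icc (l + 1) r,
              (if a < b ∧ s.getD a 0 + s.getD b 0 > s.getD i 0 then (1 : Int) else 0) := by
          intro b hb; simp only [Finset.mem_Icc] at hb
          have hbr : s.getD b 0 ≤ s.getD r 0 := hmono b r hb.2 hr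
          rw [Finset.sum_insert hnot, if_neg (by rintro ⟨_, h3⟩; omega), zero_add]
        rw [hins, Finset.sum_insert hnot, Finset.sum_congr rfl h2, h0, zero_add]
    · rw [pvLoopA, dif_neg (by omega)]
      have hz : (∑ b ∈ Finset.Icc l r, ∑ a ∈ Finset.Icc l r,
          (if a < b ∧ s.getD a 0 + s.getD b 0 > s.getD i 0 then (1 : Int) else 0)) = 0 := by
        apply Finset.sum_eq_zero; intro b hb
        apply Finset.sum_eq_zero; intro a ha
        simp only [Finset.mem_Icc] at hb ha
        rw [if_neg]; rintro ⟨h1, _⟩; omega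
      rw [hz]; ring

-- the c-th slice of pvCnt3 equals what the two-pointer loop counts (1 ≤ c < length)
lemma pv_T_eq_SN (s : List Int) {c : Nat} (hc : c < s.length) :
    pvT s c = pvSN s c := by
  unfold pvT pvSN
  have step1 : ∀ b ∈ Finset.range s.length,
      (∑ a ∈ Finset.range s.length,
        (if a < b ∧ s.getD a 0 + s.getD b 0 > s.getD c 0 ∧ b < c then (1 : Int) else 0)) =
      (if b < c then (∑ a ∈ Finset.range s.length,
        (if a < b ∧ s.getD a 0 + s.getD b 0 > s.getD c 0 then (1 : Int) else 0)) else 0) := by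
    intro b _
    by_cases hb : b < c
    · rw [if_pos hb]
      apply Finset.sum_congr rfl; intro a _
      exact if_congr (by tauto) rfl rfl
    · rw [if_neg hb]
      apply Finset.sum_eq_zero; intro a _
      rw [if_neg]; tauto
  rw [Finset.sum_congr rfl step1,
    pv_sum_range_restrict (fun b => ∑ a ∈ Finset.range s.length,
      (if a < b ∧ s.getD a 0 + s.getD b 0 > s.getD c 0 then (1 : Int) else 0)) (le_of_lt hc)]
  apply Finset.sum_congr rfl; intro b hb
  simp only [Finset.mem_range] at hb
  have step2 : ∀ a ∈ Finset.range s.length,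
      (if a < b ∧ s.getD a 0 + s.getD b 0 > s.getD c 0 then (1 : Int) else 0) =
      (if a < c then (if a < b ∧ s.getD a 0 + s.getD b 0 > s.getD c 0 then (1 : Int) else 0) else 0) := by
    intro a _
    by_cases ha : a < c
    · rw [if_pos ha]
    · rw [if_neg ha, if_neg]; rintro ⟨h1, _⟩; omega
  rw [Finset.sum_congr rfl step2,
    pv_sum_range_restrict (fun a => if a < b ∧ s.getD a 0 + s.getD b 0 > s.getD c 0 then (1 : Int) else 0) (le_of_lt hc)]

-- slices with c ≤ 1 are empty
lemma pv_T_zero (s : List Int) {c : Nat} (hc : c ≤ 1) : pvT s c = 0 := by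
  unfold pvT
  apply Finset.sum_eq_zero; intro b _
  apply Finset.sum_eq_zero; intro a _
  rw [if_neg]; rintro ⟨h1, _, h3⟩; omega

-- A's fold equals pvCnt3 on the sorted list
lemma pv_A_eq (nums : List Int) :
    triangleNumber nums = pvCnt3 (PySem.List.sorted nums (fun x => x) false) := by
  have hmono : ∀ p q : Nat, p ≤ q → q < (PySem.List.sorted nums (fun x => x) false).length →
      (PySem.List.sorted nums (fun x => x) false).getD p 0 ≤
        (PySem.List.sorted nums (fun x => x) false).getD q 0 :=
    fun p q hpq hq => pv_getD_mono nums hpq hq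
  show (PySem.List.pyRange (PySem.List.len (PySem.List.sorted nums (fun x => x) false) - 1) 1 (-1)).foldl
      (fun count i => pvLoopA (PySem.List.sorted nums (fun x => x) false) i 0 (i - 1) count) 0 =
    pvCnt3 (PySem.List.sorted nums (fun x => x) false)
  generalize hsdef : PySem.List.sorted nums (fun x => x) false = s at *
  rw [PySem.List.len_eq]
  rw [PySem.List.pyRange_neg_one]
  simp only [List.foldl_map]
  rw [show (((s.length : Int) - 1) - 1).toNat = s.length - 2 by omega]
  have hfold : (List.range (s.length - 2)).foldl
      (fun count (k : Nat) => pvLoopA s ((s.length : Int) - 1 - (k : Int)) 0 ((s.length : Int) - 1 - (k : Int) - 1) count) 0 =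
      (List.range (s.length - 2)).foldl (fun acc k => acc + pvSN s (s.length - 1 - k)) 0 := by
    apply PySem.List.foldl_congr_mem
    intro acc k hk
    beta_reduce
    have hkM : k < s.length - 2 := List.mem_range.mp hk
    rw [show ((s.length : Int) - 1 - (k : Int)) = ((s.length - 1 - k : Nat) : Int) by omega,
      show ((s.length - 1 - k : Nat) : Int) - 1 = ((s.length - 1 - k - 1 : Nat) : Int) by omega,
      show (0 : Int) = ((0 : Nat) : Int) from rfl]
    rw [pv_loopA_eq s hmono (s.length - 1 - k) (s.length - 1 - k - 1) 0 (s.length - 1 - k - 1) (le_refl _) (by omega) acc]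
    congr 1
    have hIcc : Finset.Icc 0 (s.length - 1 - k - 1) = Finset.range (s.length - 1 - k) := by
      ext x; simp only [Finset.mem_Icc, Finset.mem_range]; omega
    rw [hIcc]; rfl
  rw [hfold, PySem.List.foldl_add, zero_add,
    show ((List.range (s.length - 2)).map (fun k => pvSN s (s.length - 1 - k))).sum =
      ∑ k ∈ Finset.range (s.length - 2), pvSN s (s.length - 1 - k) from rfl]
  have hrefl : (∑ k ∈ Finset.range (s.length - 2), pvSN s (s.length - 1 - k)) =
      ∑ k ∈ Finset.range (s.length - 2), pvSN s (k + 2) := by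
    calc (∑ k ∈ Finset.range (s.length - 2), pvSN s (s.length - 1 - k))
        = ∑ k ∈ Finset.range (s.length - 2), pvSN s ((s.length - 2) - 1 - k + 2) := by
          apply Finset.sum_congr rfl; intro k hk
          have := Finset.mem_range.mp hk
          congr 1; omega
      _ = ∑ k ∈ Finset.range (s.length - 2), pvSN s (k + 2) :=
          Finset.sum_range_reflect (fun j => pvSN s (j + 2)) (s.length - 2)
  rw [hrefl]
  have hcnt3 : pvCnt3 s = ∑ c ∈ Finset.range s.length, pvT s c := rfl
  rw [hcnt3]
  by_cases hN2 : 2 ≤ s.length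
  · have hsplit : Finset.range s.length = Finset.range ((s.length - 2) + 1 + 1) := by
      congr 1; omega
    rw [hsplit, Finset.sum_range_succ' (fun c => pvT s c),
      Finset.sum_range_succ' (fun c => pvT s (c + 1))]
    simp only [Nat.zero_add]
    rw [pv_T_zero s (le_refl 1), pv_T_zero s (Nat.zero_le 1), add_zero, add_zero]
    apply Finset.sum_congr rfl; intro k hk
    have hkM := Finset.mem_range.mp hk
    rw [pv_T_eq_SN s (show k + 1 + 1 < s.length by omega)]
  · rw [show s.length - 2 = 0 by omega, Finset.sum_range_zero]
    symm
    apply Finset.sum_eq_zero; intro c hc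
    have := Finset.mem_range.mp hc
    exact pv_T_zero s (by omega)

-- ===== B side =====

-- the binary search returns the partition point of [lo, hi)
lemma pv_bisectB_inv (s : List Int)
    (hmono : ∀ p q : Nat, p ≤ q → q < s.length → s.getD p 0 ≤ s.getD q 0) (x : Int) :
    ∀ (m lo hi : Nat), hi - lo ≤ m → lo ≤ hi → hi ≤ s.length →
      ∃ p : Nat, pvBisectB s x (lo : Int) (hi : Int) = (p : Int) ∧ lo ≤ p ∧ p ≤ hi ∧
        (∀ k, lo ≤ k → k < p → s.getD k 0 < x) ∧
        (∀ k, p ≤ k → k < hi → x ≤ s.getD k 0) := by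
  intro m
  induction m with
  | zero =>
    intro lo hi hm hlohi hhi
    refine ⟨lo, ?_, le_refl _, by omega, by omega, by omega⟩
    rw [pvBisectB, dif_neg (by omega)]
  | succ m IH =>
    intro lo hi hm hlohi hhi
    by_cases hlt : lo < hi
    · rw [pvBisectB, dif_pos (by exact_mod_cast hlt)]
      have hmid : PySem.Int.floordiv ((lo : Int) + (hi : Int)) 2 = (((lo + hi) / 2 : Nat) : Int) := by
        exact_mod_cast PySem.Int.floordiv_natCast (lo + hi) 2
      rw [hmid]
      simp only [PySem.List.pyGetD_natCast]
      have hmlo : lo ≤ (lo + hi) / 2 := by omega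
      have hmhi : (lo + hi) / 2 < hi := by omega
      by_cases hx : s.getD ((lo + hi) / 2) 0 < x
      · rw [if_pos hx]
        rw [show (((lo + hi) / 2 : Nat) : Int) + 1 = (((lo + hi) / 2 + 1 : Nat) : Int) by omega]
        obtain ⟨p, heq, h1, h2, h3, h4⟩ := IH ((lo + hi) / 2 + 1) hi (by omega) (by omega) hhi
        refine ⟨p, heq, by omega, h2, ?_, h4⟩
        intro k hk1 hk2
        by_cases hkm : k ≤ (lo + hi) / 2
        · exact lt_of_le_of_lt (hmono k ((lo + hi) / 2) hkm (by omega)) hx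
        · exact h3 k (by omega) hk2
      · rw [if_neg hx]
        obtain ⟨p, heq, h1, h2, h3, h4⟩ := IH lo ((lo + hi) / 2) (by omega) hmlo (by omega)
        refine ⟨p, heq, h1, by omega, h3, ?_⟩
        intro k hk1 hk2
        by_cases hkm : k < (lo + hi) / 2
        · exact h4 k hk1 hkm
        · exact le_trans (not_lt.mp hx) (hmono ((lo + hi) / 2) k (by omega) (by omega))
    · refine ⟨lo, ?_, le_refl _, by omega, by omega, by omega⟩
      rw [pvBisectB, dif_neg (by omega)]

-- hence it counts the elements of [lo, length) below x
lemma pv_bisectB_count (s : List Int)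
    (hmono : ∀ p q : Nat, p ≤ q → q < s.length → s.getD p 0 ≤ s.getD q 0) (x : Int)
    (lo : Nat) (hlo : lo ≤ s.length) :
    pvBisectB s x (lo : Int) ((s.length : Nat) : Int) =
      (lo : Int) + ∑ k ∈ Finset.Ico lo s.length, (if s.getD k 0 < x then (1 : Int) else 0) := by
  obtain ⟨p, heq, h1, h2, h3, h4⟩ :=
    pv_bisectB_inv s hmono x (s.length - lo) lo s.length (le_refl _) hlo (le_refl _)
  rw [heq]
  rw [← Finset.sum_Ico_consecutive (fun k => if s.getD k 0 < x then (1 : Int) else 0) h1 h2]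
  have hfirst : (∑ k ∈ Finset.Ico lo p, (if s.getD k 0 < x then (1 : Int) else 0)) = (p : Int) - lo := by
    have hone : ∀ k ∈ Finset.Ico lo p, (if s.getD k 0 < x then (1 : Int) else 0) = 1 := by
      intro k hk
      obtain ⟨hk1, hk2⟩ := Finset.mem_Ico.mp hk
      rw [if_pos (h3 k hk1 hk2)]
    rw [Finset.sum_congr rfl hone, Finset.sum_const, Nat.card_Ico, nsmul_eq_mul, mul_one]
    omega
  have hsecond : (∑ k ∈ Finset.Ico p s.length, (if s.getD k 0 < x then (1 : Int) else 0)) = 0 := by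
    apply Finset.sum_eq_zero; intro k hk
    obtain ⟨hk1, hk2⟩ := Finset.mem_Ico.mp hk
    rw [if_neg (not_lt.mpr (h4 k hk1 hk2))]
  rw [hfirst, hsecond]
  ring

-- B's double fold equals pvCnt3 on the sorted list
lemma pv_B_eq (nums : List Int) :
    triangleNumber_alt nums = pvCnt3 (PySem.List.sorted nums (fun x => x) false) := by
  have hmono : ∀ p q : Nat, p ≤ q → q < (PySem.List.sorted nums (fun x => x) false).length →
      (PySem.List.sorted nums (fun x => x) false).getD p 0 ≤
        (PySem.List.sorted nums (fun x => x) false).getD q 0 :=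
    fun p q hpq hq => pv_getD_mono nums hpq hq
  show (PySem.List.pyRange 0 (PySem.List.len (PySem.List.sorted nums (fun x => x) false) - 2) 1).foldl
      (fun count i =>
        (PySem.List.pyRange (i + 1) (PySem.List.len (PySem.List.sorted nums (fun x => x) false) - 1) 1).foldl
          (fun count j =>
            count + (pvBisectB (PySem.List.sorted nums (fun x => x) false)
              (PySem.List.pyGetD (PySem.List.sorted nums (fun x => x) false) i 0 +
                PySem.List.pyGetD (PySem.List.sorted nums (fun x => x) false) j 0) (j + 1)
              (PySem.List.len (PySem.List.sorted nums (fun x => x) false)) - (j + 1)))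
          count) 0 =
    pvCnt3 (PySem.List.sorted nums (fun x => x) false)
  generalize hsdef : PySem.List.sorted nums (fun x => x) false = s at *
  rw [PySem.List.len_eq]
  rw [PySem.List.pyRange_one]
  simp only [List.foldl_map]
  rw [show (((s.length : Int) - 2) - 0).toNat = s.length - 2 by omega]
  have hfold : (List.range (s.length - 2)).foldl
      (fun count (k : Nat) =>
        (PySem.List.pyRange ((0 : Int) + (k : Int) + 1) ((s.length : Int) - 1) 1).foldl
          (fun count j =>
            count + (pvBisectB s
              (PySem.List.pyGetD s ((0 : Int) + (k : Int)) 0 + PySem.List.pyGetD s j 0) (j + 1)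
              ((s.length : Int)) - (j + 1)))
          count) 0 =
      (List.range (s.length - 2)).foldl
        (fun acc k => acc + ∑ k2 ∈ Finset.range (s.length - 2 - k), pvK s k (k + 1 + k2)) 0 := by
    apply PySem.List.foldl_congr_mem
    intro acc k hk
    beta_reduce
    have hkM : k < s.length - 2 := List.mem_range.mp hk
    rw [show ((0 : Int) + (k : Int)) = (k : Int) by ring]
    rw [PySem.List.pyRange_one]
    simp only [List.foldl_map]
    rw [show (((s.length : Int) - 1) - ((k : Int) + 1)).toNat = s.length - 2 - k by omega]
    have hinner : (List.range (s.length - 2 - k)).foldl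
        (fun count (k2 : Nat) =>
          count + (pvBisectB s
            (PySem.List.pyGetD s (k : Int) 0 + PySem.List.pyGetD s ((k : Int) + 1 + (k2 : Int)) 0)
            ((k : Int) + 1 + (k2 : Int) + 1) ((s.length : Int)) - ((k : Int) + 1 + (k2 : Int) + 1)))
        acc =
        (List.range (s.length - 2 - k)).foldl
          (fun acc2 k2 => acc2 + pvK s k (k + 1 + k2)) acc := by
      apply PySem.List.foldl_congr_mem
      intro acc2 k2 hk2
      beta_reduce
      have hk2M : k2 < s.length - 2 - k := List.mem_range.mp hk2
      rw [show ((k : Int) + 1 + (k2 : Int)) = ((k + 1 + k2 : Nat) : Int) by omega,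
        show ((k + 1 + k2 : Nat) : Int) + 1 = ((k + 1 + k2 + 1 : Nat) : Int) by omega]
      simp only [PySem.List.pyGetD_natCast]
      rw [pv_bisectB_count s hmono (s.getD k 0 + s.getD (k + 1 + k2) 0) (k + 1 + k2 + 1) (by omega)]
      unfold pvK
      have hcond : ∀ c ∈ Finset.Ico (k + 1 + k2 + 1) s.length,
          (if s.getD c 0 < s.getD k 0 + s.getD (k + 1 + k2) 0 then (1 : Int) else 0) =
          (if s.getD k 0 + s.getD (k + 1 + k2) 0 > s.getD c 0 then (1 : Int) else 0) := by
        intro c _; rfl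
      rw [Finset.sum_congr rfl hcond]
      ring
    rw [hinner, PySem.List.foldl_add]
    rfl
  rw [hfold, PySem.List.foldl_add, zero_add,
    show ((List.range (s.length - 2)).map
        (fun k => ∑ k2 ∈ Finset.range (s.length - 2 - k), pvK s k (k + 1 + k2))).sum =
      ∑ k ∈ Finset.range (s.length - 2), ∑ k2 ∈ Finset.range (s.length - 2 - k),
        pvK s k (k + 1 + k2) from rfl]
  -- now reorder pvCnt3 and identify it with the double sum
  symm
  unfold pvCnt3
  calc (∑ c ∈ Finset.range s.length, ∑ b ∈ Finset.range s.length, ∑ a ∈ Finset.range s.length,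
        (if a < b ∧ s.getD a 0 + s.getD b 0 > s.getD c 0 ∧ b < c then (1 : Int) else 0))
      = ∑ b ∈ Finset.range s.length, ∑ c ∈ Finset.range s.length, ∑ a ∈ Finset.range s.length,
        (if a < b ∧ s.getD a 0 + s.getD b 0 > s.getD c 0 ∧ b < c then (1 : Int) else 0) :=
        Finset.sum_comm
    _ = ∑ b ∈ Finset.range s.length, ∑ a ∈ Finset.range s.length, ∑ c ∈ Finset.range s.length,
        (if a < b ∧ s.getD a 0 + s.getD b 0 > s.getD c 0 ∧ b < c then (1 : Int) else 0) :=
        Finset.sum_congr rfl (fun b _ => Finset.sum_comm)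
    _ = ∑ a ∈ Finset.range s.length, ∑ b ∈ Finset.range s.length, ∑ c ∈ Finset.range s.length,
        (if a < b ∧ s.getD a 0 + s.getD b 0 > s.getD c 0 ∧ b < c then (1 : Int) else 0) :=
        Finset.sum_comm
    _ = ∑ a ∈ Finset.range s.length, ∑ b ∈ Finset.range s.length,
        (if a < b then pvK s a b else 0) := by
        apply Finset.sum_congr rfl; intro a _
        apply Finset.sum_congr rfl; intro b hb
        have hbN := Finset.mem_range.mp hb
        by_cases hab : a < b
        · rw [if_pos hab]
          have hptw : ∀ c ∈ Finset.range s.length,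
              (if a < b ∧ s.getD a 0 + s.getD b 0 > s.getD c 0 ∧ b < c then (1 : Int) else 0) =
              (if b < c then (if s.getD a 0 + s.getD b 0 > s.getD c 0 then (1 : Int) else 0) else 0) := by
            intro c _
            by_cases hbc : b < c
            · rw [if_pos hbc]
              exact if_congr (by tauto) rfl rfl
            · rw [if_neg hbc, if_neg (by tauto)]
          rw [Finset.sum_congr rfl hptw, Finset.range_eq_Ico,
            ← Finset.sum_Ico_consecutive
              (fun c => if b < c then (if s.getD a 0 + s.getD b 0 > s.getD c 0 then (1 : Int) else 0) else 0)
              (show 0 ≤ b + 1 by omega) (show b + 1 ≤ s.length by omega)]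
          have hz : (∑ c ∈ Finset.Ico 0 (b + 1),
              (if b < c then (if s.getD a 0 + s.getD b 0 > s.getD c 0 then (1 : Int) else 0) else 0)) = 0 := by
            apply Finset.sum_eq_zero; intro c hc
            have := Finset.mem_Ico.mp hc
            rw [if_neg (by omega)]
          have hid : ∀ c ∈ Finset.Ico (b + 1) s.length,
              (if b < c then (if s.getD a 0 + s.getD b 0 > s.getD c 0 then (1 : Int) else 0) else 0) =
              (if s.getD a 0 + s.getD b 0 > s.getD c 0 then (1 : Int) else 0) := by
            intro c hc
            have := Finset.mem_Ico.mp hc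
            rw [if_pos (by omega)]
          rw [hz, Finset.sum_congr rfl hid, zero_add]
          rfl
        · rw [if_neg hab]
          apply Finset.sum_eq_zero; intro c _
          rw [if_neg]; tauto
    _ = ∑ a ∈ Finset.range s.length, ∑ b ∈ Finset.Ico (a + 1) (s.length - 1), pvK s a b := by
        apply Finset.sum_congr rfl; intro a ha
        have haN := Finset.mem_range.mp ha
        have hKz : ∀ b : Nat, s.length - 1 ≤ b → pvK s a b = 0 := by
          intro b hbig
          unfold pvK
          rw [Finset.Ico_eq_empty (by omega), Finset.sum_empty]
        rw [Finset.range_eq_Ico,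
          ← Finset.sum_Ico_consecutive (fun b => if a < b then pvK s a b else 0)
            (show 0 ≤ a + 1 by omega) (show a + 1 ≤ s.length by omega)]
        have hz : (∑ b ∈ Finset.Ico 0 (a + 1), (if a < b then pvK s a b else 0)) = 0 := by
          apply Finset.sum_eq_zero; intro b hb
          have := Finset.mem_Ico.mp hb
          rw [if_neg (by omega)]
        have hid : ∀ b ∈ Finset.Ico (a + 1) s.length, (if a < b then pvK s a b else 0) = pvK s a b := by
          intro b hb
          have := Finset.mem_Ico.mp hb
          rw [if_pos (by omega)]
        rw [hz, Finset.sum_congr rfl hid, zero_add]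
        by_cases hsmall : a + 1 ≤ s.length - 1
        · rw [← Finset.sum_Ico_consecutive (fun b => pvK s a b) hsmall (show s.length - 1 ≤ s.length by omega)]
          have hz2 : (∑ b ∈ Finset.Ico (s.length - 1) s.length, pvK s a b) = 0 := by
            apply Finset.sum_eq_zero; intro b hb
            exact hKz b (Finset.mem_Ico.mp hb).1
          rw [hz2, add_zero]
        · have he1 : Finset.Ico (a + 1) s.length = ∅ := Finset.Ico_eq_empty (by omega)
          have he2 : Finset.Ico (a + 1) (s.length - 1) = ∅ := Finset.Ico_eq_empty (by omega)
          rw [he1, he2]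
    _ = ∑ a ∈ Finset.range (s.length - 2), ∑ b ∈ Finset.Ico (a + 1) (s.length - 1), pvK s a b := by
        rw [Finset.range_eq_Ico,
          ← Finset.sum_Ico_consecutive (fun a => ∑ b ∈ Finset.Ico (a + 1) (s.length - 1), pvK s a b)
            (show 0 ≤ s.length - 2 by omega) (show s.length - 2 ≤ s.length by omega)]
        have hz : (∑ a ∈ Finset.Ico (s.length - 2) s.length,
            ∑ b ∈ Finset.Ico (a + 1) (s.length - 1), pvK s a b) = 0 := by
          apply Finset.sum_eq_zero; intro a ha
          have := Finset.mem_Ico.mp ha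
          rw [Finset.Ico_eq_empty (by omega), Finset.sum_empty]
        rw [hz, add_zero, ← Finset.range_eq_Ico]
    _ = ∑ k ∈ Finset.range (s.length - 2), ∑ k2 ∈ Finset.range (s.length - 2 - k),
        pvK s k (k + 1 + k2) := by
        apply Finset.sum_congr rfl; intro a ha
        have haM := Finset.mem_range.mp ha
        rw [Finset.sum_Ico_eq_sum_range]
        rw [show (s.length - 1) - (a + 1) = s.length - 2 - a by omega]

-- ===== VERDICT (by name: the statement is the Claim_ definition above) =====
theorem triangleNumber_spec : Claim_equal_triangleNumber := by
  intro nums _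
  show triangleNumber nums = triangleNumber_alt nums
  rw [pv_A_eq, pv_B_eq]
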